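-- pv_equiv track=rewrite | github.com/venky2257/Coding-Test-of-SPGON | reverseStringAndIncrementByOne.py | reverse_string_increment_by_one
-- ===== SOURCE A (Python) =====
-- def reverse_string_increment_by_one(input1):
--     # Strings are immutable in python. so it is not advisible to modify them
--     # so we created a list with the input1 values
--
--     # check if the string is empty
--     if len(input1) == 0:
--         return ('empty String')
--
--     # storing the string in a reverse order in input_list
--     input1_list = list(input1[::-1].upper())
--
--     # iterating each char in the input_list
--     for char in range(len(input1_list)):
--         # ord will returns the ascii value of the char
--
--         # if character z appears in string - as character z doesnt contain any next letter
--         # we set character A as the next letter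
--
--         if ord(input1_list[char]) == 90:
--             next_char = 65
--
--         else:
--             # as we needed the next character we increment the ascii value by '1'
--             next_char = ord(input1_list[char]) + 1
--
--             # modify the old character of input list with new character
--         input1_list[char] = chr(next_char)
--
--         # convert the input_list into string and strong it in input
--         input1 = ''.join(input1_list)
--
--     return str(input1)
-- ===== SOURCE B (Python) =====
-- def reverse_string_increment_by_one(input1):
--     # single fused pass over the original string, building the output back-to-front:
--     # no intermediate reversed/uppercased string and no index loop
--     if not input1:
--         return 'empty String'
--     out = ''
--     for ch in input1:
--         u = ch.upper()
--         out = ('A' if u == 'Z' else chr(ord(u) + 1)) + out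
--     return out
-- ===== Notes on version B (the rewrite author's own statement) =====
-- stated objective: faster
-- what changed: Replaces A's staged pipeline (reverse, uppercase, then an index loop that mutates a list and re-joins the whole string every iteration) with a single left-to-right pass over the original string that uppercases and shifts each character and prepends it to the accumulated output, removing the intermediate reversed/uppercased string and the per-iteration full join.
import Mathlib
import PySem

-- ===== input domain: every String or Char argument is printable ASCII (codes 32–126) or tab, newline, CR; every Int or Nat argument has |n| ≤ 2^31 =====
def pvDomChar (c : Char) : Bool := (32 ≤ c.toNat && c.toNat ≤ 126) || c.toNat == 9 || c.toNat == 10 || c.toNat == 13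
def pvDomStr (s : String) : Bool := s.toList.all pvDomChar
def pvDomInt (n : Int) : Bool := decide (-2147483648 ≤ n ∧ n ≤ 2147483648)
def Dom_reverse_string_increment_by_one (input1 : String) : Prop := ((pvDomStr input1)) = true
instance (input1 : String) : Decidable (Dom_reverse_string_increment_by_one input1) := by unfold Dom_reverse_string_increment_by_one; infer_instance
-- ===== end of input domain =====

-- B replaces A's staged reverse+upper passes and index loop (which rebuilds the string every
-- iteration) by ONE pass over the original string that uppercases+shifts each char and builds
-- the output back-to-front (alternative decomposition).

-- ===== PORT A =====
-- one loop step: read list[i], compute the shifted char, write it back, rebuild the string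
def pvStepA (st : List Char × String) (i : Int) : List Char × String :=
  let c := PySem.List.pyGetD st.1 i ' '
  let nc : Nat := if c.toNat = 90 then 65 else c.toNat + 1
  let l' := PySem.List.pySetD st.1 i (Char.ofNat nc)
  (l', String.mk l')   -- ''.join(input1_list)

def reverse_string_increment_by_one (input1 : String) : String :=
  if PySem.Str.len input1 = 0 then "empty String"
  else
    let l0 := PySem.Chars.upper input1.toList.reverse   -- input1[::-1].upper()
    let res := (PySem.List.pyRange 0 l0.length 1).foldl pvStepA (l0, input1)
    res.2

-- ===== PORT B =====
-- out = ('A' if u == 'Z' else chr(ord(u)+1)) + out, u = ch.upper(), one pass over input1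
def reverse_string_increment_by_one_alt (input1 : String) : String :=
  if input1.toList = [] then "empty String"
  else
    String.mk (input1.toList.foldl
      (fun out ch =>
        let u := PySem.Chars.upperChar ch
        (if u = 'Z' then 'A' else Char.ofNat (u.toNat + 1)) :: out) [])

-- ===== PRECONDITION & SPEC =====
def Spec_reverse_string_increment_by_one (input1 : String) (out : String) : Prop := out = reverse_string_increment_by_one_alt input1
instance (input1 : String) (out : String) : Decidable (Spec_reverse_string_increment_by_one input1 out) := by unfold Spec_reverse_string_increment_by_one; infer_instance

-- ===== CLAIM =====
def Claim_equal_reverse_string_increment_by_one : Prop := ∀ (input1 : String), Dom_reverse_string_increment_by_one input1 → Spec_reverse_string_increment_by_one input1 (reverse_string_increment_by_one input1)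

-- ===== LEMMAS AND PROOFS =====

def pvShift (c : Char) : Char := if c = 'Z' then 'A' else Char.ofNat (c.toNat + 1)

lemma pvShift_eq_A_branch (c : Char) :
    Char.ofNat (if c.toNat = 90 then 65 else c.toNat + 1) = pvShift c := by
  unfold pvShift
  by_cases h : c = 'Z'
  · subst h; rfl
  · have h90 : c.toNat ≠ 90 := by
      intro hc
      apply h
      have h1 : Char.ofNat c.toNat = c := Char.ofNat_toNat c
      rw [hc] at h1
      exact h1.symm.trans rfl
    rw [if_neg h90, if_neg h]

lemma pvLoopA (rest done : List Char) (s : String) :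
    (PySem.List.pyRange (done.length : Int) ((done.length : Int) + rest.length) 1).foldl
        pvStepA (done ++ rest, s)
      = (done ++ rest.map pvShift,
         if rest = [] then s else String.mk (done ++ rest.map pvShift)) := by
  induction rest generalizing done s with
  | nil => simp [PySem.List.pyRange]
  | cons c t ih =>
    have hlt : (done.length : Int) < (done.length : Int) + (c :: t).length := by
      simp
    rw [PySem.List.pyRange_one_cons hlt]
    simp only [List.foldl_cons]
    have hget : PySem.List.pyGetD (done ++ c :: t) (done.length : Int) ' ' = c := by
      simp [PySem.List.pyGetD_natCast]
    have hset : PySem.List.pySetD (done ++ c :: t) (done.length : Int) (pvShift c)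
        = done ++ pvShift c :: t := by
      simp [PySem.List.pySetD_natCast, List.set_append_right]
    have hstep : pvStepA (done ++ c :: t, s) (done.length : Int)
        = (done ++ pvShift c :: t, String.mk (done ++ pvShift c :: t)) := by
      simp only [pvStepA, hget, pvShift_eq_A_branch, hset]
    rw [hstep]
    have harr : done ++ pvShift c :: t = (done ++ [pvShift c]) ++ t := by simp
    have hlen : ((done.length : Int) + 1) = ((done ++ [pvShift c]).length : Int) := by
      simp
    have hstop : (done.length : Int) + ((c :: t).length : Int)
        = ((done ++ [pvShift c]).length : Int) + (t.length : Int) := by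
      simp; omega
    rw [harr, hlen, hstop, ih]
    rcases t with _ | ⟨d, t'⟩ <;> simp

-- B's fold with prepend builds the mapped list reversed
lemma pvFoldPrepend (g : Char → Char) (l acc : List Char) :
    l.foldl (fun out ch => g ch :: out) acc = (l.map g).reverse ++ acc := by
  induction l generalizing acc with
  | nil => simp
  | cons c t ih => simp [ih]

-- ===== VERDICT =====
theorem reverse_string_increment_by_one_spec : Claim_equal_reverse_string_increment_by_one := by
  intro input1 _
  show _ = _
  unfold reverse_string_increment_by_one reverse_string_increment_by_one_alt
  by_cases h : input1.toList = []
  · simp [h, PySem.Str.len_eq]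
  · have hlen : ¬ PySem.Str.len input1 = 0 := by
      rw [PySem.Str.len_eq]
      intro hz
      exact h (List.length_eq_zero_iff.mp (by exact_mod_cast hz))
    simp only [hlen, if_neg h, if_false]
    set s := input1.toList with hs
    have hupper : PySem.Chars.upper s.reverse = s.reverse.map PySem.Chars.upperChar := rfl
    have hA := pvLoopA (PySem.Chars.upper s.reverse) [] input1
    simp only [List.nil_append, List.length_nil, Nat.cast_zero, zero_add] at hA
    rw [hA]
    have hne : PySem.Chars.upper s.reverse ≠ [] := by
      rw [hupper]; simp [h]
    rw [if_neg hne]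
    rw [pvFoldPrepend (fun ch => let u := PySem.Chars.upperChar ch
        if u = 'Z' then 'A' else Char.ofNat (u.toNat + 1))]
    rw [hupper, List.map_map, ← List.map_reverse]
    simp only [Function.comp_def, pvShift, List.append_nil]
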